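-- pv_equiv track=rewrite | github.com/kovac-dvm/Brovey-Pansharpening | process_bands.py | get_idx
-- ===== SOURCE A (Python) =====
-- def get_idx(bands: list):
--     """
--     Get indexes of RGB channels and the rest of bands from multi-spectral image.
--     :param bands:   sorted list of channel names in a multi-spectral image, RGB channels should be named as either
--                     the full color name or just the initial letter, both uppercase/lowercase letters work
--                     - e.g. ['bLuE', 'G', 'r', 'red-edge', 'near-IR'],
--     :return:        tuple of lists - the first of RGB positions in the image and the second of the rest of the bands
--     """
--     idx_b = [i for i in range(len(bands)) if bands[i].upper() == 'B' or bands[i].upper() == 'BLUE']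
--     if len(idx_b) > 1:
--         raise Exception("There are more bands in the list defined as blue.")
--     elif len(idx_b) == 0:
--         raise Exception("There should be at least one band in the list defined as blue.")
--     else:
--         idx_b = idx_b[0]
--     idx_g = [i for i in range(len(bands)) if bands[i].upper() == 'G' or bands[i].upper() == 'GREEN']
--     if len(idx_g) > 1:
--         raise Exception("There are more bands in the list defined as green.")
--     elif len(idx_g) == 0:
--         raise Exception("There should be at least one band in the list defined as green.")
--     else:
--         idx_g = idx_g[0]
--     idx_r = [i for i in range(len(bands)) if bands[i].upper() == 'R' or bands[i].upper() == 'RED']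
--     if len(idx_r) > 1:
--         raise Exception("There are more bands in the list defined as red.")
--     elif len(idx_r) == 0:
--         raise Exception("There should be at least one band in the list defined as red.")
--     else:
--         idx_r = idx_r[0]
--     index_rgb = list([idx_r, idx_g, idx_b])
--     index_rest = [k for k in range(len(bands)) if k not in list(index_rgb)]
--     return index_rgb, index_rest
-- ===== SOURCE B (Python) =====
-- def get_idx(bands: list):
--     """Single classification pass over the bands, then validation in blue/green/red
--     priority order; the rest indices are collected in the same pass."""
--     bs, gs, rs, rest = [], [], [], []
--     for i, name in enumerate(bands):
--         u = name.upper()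
--         if u in ('B', 'BLUE'):
--             bs.append(i)
--         elif u in ('G', 'GREEN'):
--             gs.append(i)
--         elif u in ('R', 'RED'):
--             rs.append(i)
--         else:
--             rest.append(i)
--     for idxs, color in ((bs, 'blue'), (gs, 'green'), (rs, 'red')):
--         if len(idxs) > 1:
--             raise Exception("There are more bands in the list defined as %s." % color)
--         if len(idxs) == 0:
--             raise Exception("There should be at least one band in the list defined as %s." % color)
--     return [rs[0], gs[0], bs[0]], rest
-- ===== Notes on version B (the rewrite author's own statement) =====
-- stated objective: faster
-- what changed: one classification pass over enumerate(bands) that buckets each index into blue/green/red/rest lists (validated afterwards in the original priority order), instead of three separate filter passes plus a complement pass that rebuilds the rgb list and scans it for every index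
import Mathlib
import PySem

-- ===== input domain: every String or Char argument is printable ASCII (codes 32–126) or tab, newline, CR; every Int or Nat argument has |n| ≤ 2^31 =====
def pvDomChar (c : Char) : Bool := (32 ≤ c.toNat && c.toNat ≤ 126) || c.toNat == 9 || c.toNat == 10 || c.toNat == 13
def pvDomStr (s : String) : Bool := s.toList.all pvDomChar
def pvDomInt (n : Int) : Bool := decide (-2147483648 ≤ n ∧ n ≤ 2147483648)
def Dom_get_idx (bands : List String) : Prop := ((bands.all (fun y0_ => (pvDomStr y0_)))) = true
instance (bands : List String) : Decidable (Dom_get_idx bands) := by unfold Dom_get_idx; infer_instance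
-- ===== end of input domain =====

-- B replaces A's three filter passes + membership-scan complement pass by one classification
-- pass over enumerate(bands) (objective: faster by a constant factor); same return value on Pre_.


-- ===== PORT A =====
-- literal port of A: three list comprehensions over range(len(bands)), then the complement
-- comprehension; where the Python raises the port returns ([], []) (excluded by Pre_).
def get_idx (bands : List String) : List Int × List Int :=
  let idx_b := (PySem.List.pyRange 0 (PySem.List.len bands) 1).filter
    (fun i => PySem.Str.upper (PySem.List.pyGetD bands i "") == "B" ||
              PySem.Str.upper (PySem.List.pyGetD bands i "") == "BLUE")
  if idx_b.length > 1 then ([], [])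
  else if idx_b.length = 0 then ([], [])
  else
    let b := PySem.List.pyGetD idx_b 0 0
    let idx_g := (PySem.List.pyRange 0 (PySem.List.len bands) 1).filter
      (fun i => PySem.Str.upper (PySem.List.pyGetD bands i "") == "G" ||
                PySem.Str.upper (PySem.List.pyGetD bands i "") == "GREEN")
    if idx_g.length > 1 then ([], [])
    else if idx_g.length = 0 then ([], [])
    else
      let g := PySem.List.pyGetD idx_g 0 0
      let idx_r := (PySem.List.pyRange 0 (PySem.List.len bands) 1).filter
        (fun i => PySem.Str.upper (PySem.List.pyGetD bands i "") == "R" ||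
                  PySem.Str.upper (PySem.List.pyGetD bands i "") == "RED")
      if idx_r.length > 1 then ([], [])
      else if idx_r.length = 0 then ([], [])
      else
        let r := PySem.List.pyGetD idx_r 0 0
        let index_rgb : List Int := [r, g, b]
        let index_rest := (PySem.List.pyRange 0 (PySem.List.len bands) 1).filter
          (fun k => !(index_rgb.contains k))
        (index_rgb, index_rest)

-- ===== PORT B =====
-- helper of B: body of the single classification loop (the elif chain of Source B)
def pvClassStep (acc : List Int × List Int × List Int × List Int) (p : Int × String) :
    List Int × List Int × List Int × List Int :=
  let u := PySem.Str.upper p.2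
  if ["B", "BLUE"].contains u then (acc.1 ++ [p.1], acc.2.1, acc.2.2.1, acc.2.2.2)
  else if ["G", "GREEN"].contains u then (acc.1, acc.2.1 ++ [p.1], acc.2.2.1, acc.2.2.2)
  else if ["R", "RED"].contains u then (acc.1, acc.2.1, acc.2.2.1 ++ [p.1], acc.2.2.2)
  else (acc.1, acc.2.1, acc.2.2.1, acc.2.2.2 ++ [p.1])

def get_idx_alt (bands : List String) : List Int × List Int :=
  let acc := (PySem.List.enumerate bands 0).foldl pvClassStep ([], [], [], [])
  let bs := acc.1
  let gs := acc.2.1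
  let rs := acc.2.2.1
  let rest := acc.2.2.2
  if bs.length > 1 then ([], [])
  else if bs.length = 0 then ([], [])
  else if gs.length > 1 then ([], [])
  else if gs.length = 0 then ([], [])
  else if rs.length > 1 then ([], [])
  else if rs.length = 0 then ([], [])
  else ([PySem.List.pyGetD rs 0 0, PySem.List.pyGetD gs 0 0, PySem.List.pyGetD bs 0 0], rest)

-- ===== PRECONDITION & SPEC =====
-- Pre_ excludes exactly the inputs on which A raises: bands without exactly one blue band,
-- exactly one green band and exactly one red band (by upper-cased name).
def Pre_get_idx (bands : List String) : Prop :=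
  bands.countP (fun s => PySem.Str.upper s == "B" || PySem.Str.upper s == "BLUE") = 1 ∧
  bands.countP (fun s => PySem.Str.upper s == "G" || PySem.Str.upper s == "GREEN") = 1 ∧
  bands.countP (fun s => PySem.Str.upper s == "R" || PySem.Str.upper s == "RED") = 1
instance (bands : List String) : Decidable (Pre_get_idx bands) := by
  unfold Pre_get_idx; infer_instance
def pvWitness_get_idx : List String := ["bLuE", "G", "r", "red-edge", "near-IR"]
def Spec_get_idx (bands : List String) (out : List Int × List Int) : Prop := out = get_idx_alt bands
instance (bands : List String) (out : List Int × List Int) : Decidable (Spec_get_idx bands out) := by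
  unfold Spec_get_idx; infer_instance

-- ===== CLAIM (what is proved, stated in full; the proofs are below) =====
def Claim_equal_get_idx : Prop := ∀ (bands : List String), Dom_get_idx bands → Pre_get_idx bands → Spec_get_idx bands (get_idx bands)

-- ===== LEMMAS AND PROOFS =====

-- predicates of the two ports, named for the proofs (pvQX s = "band s is named X")
def pvQB (s : String) : Bool := PySem.Str.upper s == "B" || PySem.Str.upper s == "BLUE"
def pvQG (s : String) : Bool := PySem.Str.upper s == "G" || PySem.Str.upper s == "GREEN"
def pvQR (s : String) : Bool := PySem.Str.upper s == "R" || PySem.Str.upper s == "RED"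

theorem pvcont (u a b : String) : ([a,b].contains u) = (u == a || u == b) := by
  simp only [List.contains_cons, List.contains_nil, Bool.or_false]

-- the classification fold of B collects the four (mutually exclusive) filters of enumerate
theorem pvFold (l : List String) (s : Int) (a b c d : List Int) :
  (PySem.List.enumerate l s).foldl pvClassStep (a, b, c, d) =
  (a ++ ((PySem.List.enumerate l s).filter (fun p => pvQB p.2)).map (·.1),
   b ++ ((PySem.List.enumerate l s).filter (fun p => !pvQB p.2 && pvQG p.2)).map (·.1),
   c ++ ((PySem.List.enumerate l s).filter (fun p => !pvQB p.2 && !pvQG p.2 && pvQR p.2)).map (·.1),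
   d ++ ((PySem.List.enumerate l s).filter (fun p => !pvQB p.2 && !pvQG p.2 && !pvQR p.2)).map (·.1)) := by
  induction l generalizing s a b c d with
  | nil => simp [PySem.List.enumerate_nil]
  | cons x xs ih =>
    have hstep : ∀ (acc : List Int × List Int × List Int × List Int),
        pvClassStep acc (s, x) =
          if pvQB x then (acc.1 ++ [s], acc.2.1, acc.2.2.1, acc.2.2.2)
          else if pvQG x then (acc.1, acc.2.1 ++ [s], acc.2.2.1, acc.2.2.2)
          else if pvQR x then (acc.1, acc.2.1, acc.2.2.1 ++ [s], acc.2.2.2)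
          else (acc.1, acc.2.1, acc.2.2.1, acc.2.2.2 ++ [s]) := by
      intro acc; simp only [pvClassStep, pvcont, pvQB, pvQG, pvQR]; rfl
    simp only [PySem.List.enumerate_cons, List.foldl_cons, hstep]
    by_cases hb : pvQB x <;> by_cases hg : pvQG x <;> by_cases hr : pvQR x <;>
      simp [hb, hg, hr, ih]

-- a name can match at most one of the three colors
theorem pvExclBG (s : String) (h : pvQG s = true) : pvQB s = false := by
  simp only [pvQG, Bool.or_eq_true, beq_iff_eq] at h
  rcases h with h | h <;> simp [pvQB, h]
theorem pvExclBR (s : String) (h : pvQR s = true) : pvQB s = false := by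
  simp only [pvQR, Bool.or_eq_true, beq_iff_eq] at h
  rcases h with h | h <;> simp [pvQB, h]
theorem pvExclGR (s : String) (h : pvQR s = true) : pvQG s = false := by
  simp only [pvQR, Bool.or_eq_true, beq_iff_eq] at h
  rcases h with h | h <;> simp [pvQG, h]

-- a filter of enumerate, projected to indices, is a filter of range(len) through indexing
theorem pvFiltMap (bands : List String) (q : String → Bool) :
  ((PySem.List.enumerate bands 0).filter (fun p => q p.2)).map (·.1) =
  (PySem.List.pyRange 0 (PySem.List.len bands) 1).filter
    (fun i => q (PySem.List.pyGetD bands i "")) := by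
  rw [PySem.List.enumerate_eq_map_pyRange bands ""]
  rw [List.filter_map, List.map_map]
  simp [Function.comp_def]

theorem pvCountEnum (l : List String) (q : String → Bool) :
    ∀ s, ((PySem.List.enumerate l s).filter (fun p => q p.2)).length = l.countP q := by
  induction l with
  | nil => simp [PySem.List.enumerate_nil]
  | cons x xs ih =>
    intro s
    by_cases h : q x <;>
      simp [PySem.List.enumerate_cons, h, ih]

-- if the filtered index list is the singleton [x], the predicate holds exactly at x
theorem pvMemOne (bands : List String) (q : String → Bool) (x : Int)
    (h : (PySem.List.pyRange 0 (PySem.List.len bands) 1).filter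
      (fun i => q (PySem.List.pyGetD bands i "")) = [x]) :
    ∀ k, k ∈ PySem.List.pyRange 0 (PySem.List.len bands) 1 →
      q (PySem.List.pyGetD bands k "") = (k == x) := by
  intro k hk
  by_cases hq : q (PySem.List.pyGetD bands k "") = true
  · have hmem : k ∈ [x] := h ▸ List.mem_filter.mpr ⟨hk, hq⟩
    simp only [List.mem_singleton] at hmem
    subst hmem
    simp [hq]
  · simp only [Bool.not_eq_true] at hq
    rw [hq]
    cases hkx : k == x
    · rfl
    · exfalso
      have hx : x ∈ [x] := List.mem_singleton.mpr rfl
      rw [← h] at hx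
      have := (List.mem_filter.mp hx).2
      rw [beq_iff_eq] at hkx
      rw [← hkx] at this
      rw [hq] at this
      exact Bool.false_ne_true this

theorem get_idx_spec : Claim_equal_get_idx := by
  intro bands _ hpre
  unfold Spec_get_idx
  have fb : ∀ t, (PySem.Str.upper t == "B" || PySem.Str.upper t == "BLUE") = pvQB t :=
    fun t => rfl
  have fg : ∀ t, (PySem.Str.upper t == "G" || PySem.Str.upper t == "GREEN") = pvQG t :=
    fun t => rfl
  have fr : ∀ t, (PySem.Str.upper t == "R" || PySem.Str.upper t == "RED") = pvQR t :=
    fun t => rfl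
  unfold Pre_get_idx at hpre
  simp only [fb, fg, fr] at hpre
  obtain ⟨h1, h2, h3⟩ := hpre
  -- the three index lists are singletons
  have lenB : ((PySem.List.pyRange 0 (PySem.List.len bands) 1).filter
      (fun i => pvQB (PySem.List.pyGetD bands i ""))).length = 1 := by
    rw [← pvFiltMap bands pvQB, List.length_map, pvCountEnum]; exact h1
  have lenG : ((PySem.List.pyRange 0 (PySem.List.len bands) 1).filter
      (fun i => pvQG (PySem.List.pyGetD bands i ""))).length = 1 := by
    rw [← pvFiltMap bands pvQG, List.length_map, pvCountEnum]; exact h2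
  have lenR : ((PySem.List.pyRange 0 (PySem.List.len bands) 1).filter
      (fun i => pvQR (PySem.List.pyGetD bands i ""))).length = 1 := by
    rw [← pvFiltMap bands pvQR, List.length_map, pvCountEnum]; exact h3
  obtain ⟨b0, hLB⟩ := List.length_eq_one_iff.mp lenB
  obtain ⟨g0, hLG⟩ := List.length_eq_one_iff.mp lenG
  obtain ⟨r0, hLR⟩ := List.length_eq_one_iff.mp lenR
  -- B's four buckets, through the fold characterization
  have hgFilt : (PySem.List.enumerate bands 0).filter (fun p => !pvQB p.2 && pvQG p.2) =
      (PySem.List.enumerate bands 0).filter (fun p => pvQG p.2) :=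
    List.filter_congr (by
      intro p _
      cases h : pvQG p.2
      · simp
      · simp [pvExclBG _ h])
  have hrFilt : (PySem.List.enumerate bands 0).filter
        (fun p => !pvQB p.2 && !pvQG p.2 && pvQR p.2) =
      (PySem.List.enumerate bands 0).filter (fun p => pvQR p.2) :=
    List.filter_congr (by
      intro p _
      cases h : pvQR p.2
      · simp
      · simp [pvExclBR _ h, pvExclGR _ h])
  -- B's rest bucket equals A's complement filter
  have hrest : ((PySem.List.enumerate bands 0).filter
        (fun p => !pvQB p.2 && !pvQG p.2 && !pvQR p.2)).map (·.1) =
      (PySem.List.pyRange 0 (PySem.List.len bands) 1).filter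
        (fun k => !([r0, g0, b0].contains k)) := by
    rw [pvFiltMap bands (fun s => !pvQB s && !pvQG s && !pvQR s)]
    refine List.filter_congr ?_
    intro k hk
    rw [pvMemOne bands pvQB b0 hLB k hk, pvMemOne bands pvQG g0 hLG k hk,
        pvMemOne bands pvQR r0 hLR k hk]
    by_cases h1 : k = r0 <;> by_cases h2 : k = g0 <;> by_cases h3 : k = b0 <;>
      simp [h1, h2, h3]
  simp only [get_idx, get_idx_alt, fb, fg, fr]
  rw [pvFold, List.nil_append, List.nil_append, List.nil_append, List.nil_append,
      hgFilt, hrFilt, hrest,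
      pvFiltMap bands pvQB, pvFiltMap bands pvQG, pvFiltMap bands pvQR,
      hLB, hLG, hLR]
  simp [PySem.List.pyGetD_zero_cons]
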